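-- pv_equiv track=rewrite | github.com/wenhao-zhang/nlp | hw1/flatten_tree_results.py | split_rules
-- ===== SOURCE A (Python) =====
-- def add_spaces(length):
--     '''
--     Inserts spaces to a string for formatting of Vocab output file
--     '''
--     spaces = " "
--     for i in range(5 - length):
--         spaces = spaces + " "
--     return spaces
--
-- def split_rules(firt_symbol, atoms):
--     """
--     Splits a rule into an array of three token rules. ex: S1 NN NP VP -> ['S1 NN _NP','_NP NP VP']
--     """
--     first_symbol = "S1"
--     rules = []
--     subrules = [first_symbol, atoms[0]]
--     for idx, item in enumerate(atoms):
--         if item != atoms[0] and item != atoms[-1]: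
--             subrules.append(f'+{item}')
--             subrules.append(item)
--     subrules.append(atoms[-1])
--     for i in range(0, len(subrules)-2, 2):
--        rules.append(f'{subrules[i]}{add_spaces(len(subrules[i]))}{subrules[i+1]}   {subrules[i+2]}')
--     return rules
-- ===== SOURCE B (Python) =====
-- def split_rules(firt_symbol, atoms):
--     first, last = atoms[0], atoms[-1]
--     mids = [x for x in atoms if x != first and x != last]
--     plus = ['+' + m for m in mids]
--     lefts = ['S1'] + plus
--     mcol = [first] + mids
--     rights = plus + [last]
--     return [f'{l}{" " * max(1, 6 - len(l))}{m}   {r}'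
--             for l, m, r in zip(lefts, mcol, rights)]
-- ===== Notes on version B (the rewrite author's own statement) =====
-- stated objective: simpler
-- what changed: B replaces A's mutable flattened 'subrules' array and its second stride-2 indexed re-scan by directly zipping three parallel role sequences (lefts, middles, rights) built from the filtered middle atoms, formatting each triple in one comprehension with a closed-form pad instead of the add_spaces loop.
import Mathlib
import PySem

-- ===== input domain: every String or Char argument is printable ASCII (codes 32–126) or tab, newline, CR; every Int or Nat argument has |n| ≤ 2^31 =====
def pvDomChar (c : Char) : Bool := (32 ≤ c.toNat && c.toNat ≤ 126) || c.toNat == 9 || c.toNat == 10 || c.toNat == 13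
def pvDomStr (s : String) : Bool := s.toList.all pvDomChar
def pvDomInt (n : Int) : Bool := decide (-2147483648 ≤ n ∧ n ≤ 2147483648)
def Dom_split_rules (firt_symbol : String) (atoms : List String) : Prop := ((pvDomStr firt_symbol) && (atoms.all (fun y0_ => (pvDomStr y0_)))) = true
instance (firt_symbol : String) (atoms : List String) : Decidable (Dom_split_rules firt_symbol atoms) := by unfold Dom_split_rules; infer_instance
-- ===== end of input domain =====

-- ===== PORT A =====
-- B changes only the decomposition (three zipped role sequences instead of a flattened
-- array re-scanned with stride 2); same output, same cost ("simpler", not faster).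
-- A raises IndexError on atoms = []; Pre_ excludes exactly that.
def add_spaces (length : Int) : String :=
  (PySem.List.pyRange 0 (5 - length) 1).foldl (fun spaces _ => spaces ++ " ") " "

def split_rules (firt_symbol : String) (atoms : List String) : List String :=
  let first_symbol := "S1"
  let rules : List String := []
  let a0 := (PySem.List.pyGet? atoms 0).getD ""          -- atoms[0]; Pre_ rules out none
  let alast := (PySem.List.pyGet? atoms (-1)).getD ""    -- atoms[-1]
  let subrules := (PySem.List.enumerate atoms 0).foldl
    (fun sub p => if p.2 ≠ a0 ∧ p.2 ≠ alast then sub ++ ["+" ++ p.2, p.2] else sub)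
    [first_symbol, a0]
  let subrules := subrules ++ [alast]
  (PySem.List.pyRange 0 (PySem.List.len subrules - 2) 2).foldl
    (fun rules i =>
      rules ++ [PySem.List.pyGetD subrules i "" ++
                add_spaces (PySem.Str.len (PySem.List.pyGetD subrules i "")) ++
                PySem.List.pyGetD subrules (i + 1) "" ++ "   " ++
                PySem.List.pyGetD subrules (i + 2) ""])
    rules

-- ===== PORT B =====
def split_rules_alt (firt_symbol : String) (atoms : List String) : List String :=
  let first := (PySem.List.pyGet? atoms 0).getD ""
  let last := (PySem.List.pyGet? atoms (-1)).getD ""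
  let mids := atoms.filter (fun x => x ≠ first ∧ x ≠ last)
  let plus := mids.map (fun m => "+" ++ m)
  let lefts := ["S1"] ++ plus
  let mcol := [first] ++ mids
  let rights := plus ++ [last]
  (lefts.zip (mcol.zip rights)).map (fun p =>
    p.1 ++ String.ofList (PySem.List.pyRepeat [' '] (max 1 (6 - PySem.Str.len p.1))) ++
    p.2.1 ++ "   " ++ p.2.2)

-- ===== PRECONDITION & SPEC =====
-- A raises IndexError on atoms = [] (atoms[0]); B raises there too.
def Pre_split_rules (firt_symbol : String) (atoms : List String) : Prop := atoms ≠ []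
instance (firt_symbol : String) (atoms : List String) : Decidable (Pre_split_rules firt_symbol atoms) := by unfold Pre_split_rules; infer_instance
def pvWitness_split_rules : String × List String := ("S", ["NN", "NP", "VP"])
def Spec_split_rules (firt_symbol : String) (atoms : List String) (out : List String) : Prop := out = split_rules_alt firt_symbol atoms
instance (firt_symbol : String) (atoms : List String) (out : List String) : Decidable (Spec_split_rules firt_symbol atoms out) := by unfold Spec_split_rules; infer_instance

-- ===== CLAIM (what is proved, stated in full; the proofs are below) =====
def Claim_equal_split_rules : Prop := ∀ (firt_symbol : String) (atoms : List String), Dom_split_rules firt_symbol atoms → Pre_split_rules firt_symbol atoms → Spec_split_rules firt_symbol atoms (split_rules firt_symbol atoms)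

-- ===== LEMMAS AND PROOFS =====

-- the common formatting of one three-token rule (A's spelling)
def fmt (l m r : String) : String := l ++ add_spaces (PySem.Str.len l) ++ m ++ "   " ++ r

-- the chain of rules generated from first atom, middle atoms and last atom
def chain (l m : String) (ms : List String) (last : String) : List String :=
  match ms with
  | [] => [fmt l m last]
  | x :: ms' => fmt l m ("+" ++ x) :: chain ("+" ++ x) x ms' last

lemma foldl_spaces (l : List Int) (s : List Char) :
    l.foldl (fun sp _ => sp ++ " ") (String.ofList s) = String.ofList (s ++ List.replicate l.length ' ') := by
  induction l generalizing s with
  | nil => simp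
  | cons x t ih =>
    have h1 : String.ofList s ++ " " = String.ofList (s ++ [' ']) := by
      rw [String.ofList_append]
    simp only [List.foldl_cons, h1, ih, List.length_cons]
    rw [List.append_assoc]
    simp [List.replicate_succ]

lemma add_spaces_eq (n : Int) :
    add_spaces n = String.ofList (PySem.List.pyRepeat [' '] (max 1 (6 - n))) := by
  unfold add_spaces
  have h : (" " : String) = String.ofList [' '] := rfl
  rw [h, foldl_spaces, PySem.List.pyRepeat_singleton, PySem.List.length_pyRange_one]
  congr 1
  have : (max 1 (6 - n)).toNat = 1 + (5 - n).toNat := by omega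
  rw [this, List.replicate_add]
  simp

-- B's per-triple formatter is fmt
lemma fmtB_eq (l m r : String) :
    l ++ String.ofList (PySem.List.pyRepeat [' '] (max 1 (6 - PySem.Str.len l))) ++ m ++ "   " ++ r = fmt l m r := by
  rw [fmt, add_spaces_eq]

-- Nat-indexed view of one formatted triple read from the flattened array
def F (s : List String) (j : Nat) : String :=
  fmt (s.getD (2 * j) "") (s.getD (2 * j + 1) "") (s.getD (2 * j + 2) "")

lemma F_cons_cons (x y : String) (s : List String) (j : Nat) :
    F (x :: y :: s) (j + 1) = F s j := by
  have h0 : 2 * (j + 1) = 2 * j + 1 + 1 := by omega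
  simp [F, h0]

-- the interleaved middle section ['+m', m, '+m2', m2, ...]
def inter (ms : List String) : List String := ms.flatMap (fun m => ["+" ++ m, m])

lemma range_map_F (ms : List String) (l m last : String) :
    (List.range (ms.length + 1)).map (F (l :: m :: (inter ms ++ [last]))) = chain l m ms last := by
  induction ms generalizing l m with
  | nil => simp [F, chain, inter]
  | cons x t ih =>
    rw [List.range_succ_eq_map, List.map_cons, List.map_map]
    have hhead : F (l :: m :: (inter (x :: t) ++ [last])) 0 = fmt l m ("+" ++ x) := by
      simp [F, inter]
    have htail : (F (l :: m :: (inter (x :: t) ++ [last]))) ∘ Nat.succ =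
        F (("+" ++ x) :: x :: (inter t ++ [last])) := by
      funext j
      have : inter (x :: t) ++ [last] = ("+" ++ x) :: x :: (inter t ++ [last]) := by
        simp [inter]
      rw [Function.comp_apply, this]
      exact F_cons_cons _ _ _ j
    simp only [List.length_cons]
    rw [hhead, htail, ih]
    rfl

lemma pyRange_step_two (k : Nat) :
    PySem.List.pyRange 0 (2 * (k : Int) + 1) 2 = (List.range (k + 1)).map (fun j : Nat => ((2 * j : Nat) : Int)) := by
  rw [PySem.List.pyRange_of_pos 0 (2 * (k : Int) + 1) (by norm_num)]
  have hlt : (0 : Int) < 2 * (k : Int) + 1 := by positivity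
  rw [if_pos hlt]
  have hc : ((2 * (k : Int) + 1 - 0 + 2 - 1) / 2).toNat = k + 1 := by omega
  rw [hc]
  apply List.map_congr_left
  intro j _
  push_cast
  ring

lemma flatMap_if_eq_inter (a0 alast : String) (l : List String) :
    l.flatMap (fun x => if x ≠ a0 ∧ x ≠ alast then ["+" ++ x, x] else []) =
    inter (l.filter (fun x => x ≠ a0 ∧ x ≠ alast)) := by
  induction l with
  | nil => simp [inter]
  | cons y t ih =>
    by_cases h : y ≠ a0 ∧ y ≠ alast
    · simp only [List.flatMap_cons, if_pos h, ih, inter, List.filter_cons]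
      simp [h]
    · simp only [List.flatMap_cons, if_neg h, List.nil_append, ih, inter, List.filter_cons]
      simp [h]

-- the subrules array A builds, in closed form
lemma subrules_eq (atoms : List String) (a0 alast : String) :
    (PySem.List.enumerate atoms 0).foldl
      (fun sub p => if p.2 ≠ a0 ∧ p.2 ≠ alast then sub ++ ["+" ++ p.2, p.2] else sub)
      ["S1", a0] ++ [alast]
    = "S1" :: a0 :: (inter (atoms.filter (fun x => x ≠ a0 ∧ x ≠ alast)) ++ [alast]) := by
  have hstep : (fun (sub : List String) (p : Int × String) =>
      if p.2 ≠ a0 ∧ p.2 ≠ alast then sub ++ ["+" ++ p.2, p.2] else sub) =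
      (fun sub p => sub ++ (if p.2 ≠ a0 ∧ p.2 ≠ alast then ["+" ++ p.2, p.2] else [])) := by
    funext sub p
    split_ifs <;> simp
  rw [hstep, PySem.List.foldl_append_eq_flatMap]
  have hsnd : (PySem.List.enumerate atoms 0).flatMap
      (fun p => if p.2 ≠ a0 ∧ p.2 ≠ alast then ["+" ++ p.2, p.2] else []) =
      atoms.flatMap (fun x => if x ≠ a0 ∧ x ≠ alast then ["+" ++ x, x] else []) := by
    conv_rhs => rw [← PySem.List.map_snd_enumerate atoms 0]
    rw [List.flatMap_map]
  rw [hsnd]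
  rw [flatMap_if_eq_inter]
  simp

lemma loopA_eq_chain (ms : List String) (a0 alast : String) :
    (PySem.List.pyRange 0 (PySem.List.len ("S1" :: a0 :: (inter ms ++ [alast])) - 2) 2).foldl
      (fun rules i =>
        rules ++ [PySem.List.pyGetD ("S1" :: a0 :: (inter ms ++ [alast])) i "" ++
                  add_spaces (PySem.Str.len (PySem.List.pyGetD ("S1" :: a0 :: (inter ms ++ [alast])) i "")) ++
                  PySem.List.pyGetD ("S1" :: a0 :: (inter ms ++ [alast])) (i + 1) "" ++ "   " ++
                  PySem.List.pyGetD ("S1" :: a0 :: (inter ms ++ [alast])) (i + 2) ""])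
      ([] : List String) = chain "S1" a0 ms alast := by
  set s := "S1" :: a0 :: (inter ms ++ [alast]) with hs
  have hlen : s.length = 2 * ms.length + 3 := by
    simp [hs, inter, List.length_flatMap]
    omega
  rw [PySem.List.foldl_append_singleton_eq_map, List.nil_append]
  have hn : PySem.List.len s - 2 = 2 * (ms.length : Int) + 1 := by
    rw [PySem.List.len_eq, hlen]; push_cast; ring
  rw [hn, pyRange_step_two, List.map_map]
  have hfun : ∀ j ∈ List.range (ms.length + 1),
      ((fun i => PySem.List.pyGetD s i "" ++
          add_spaces (PySem.Str.len (PySem.List.pyGetD s i "")) ++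
          PySem.List.pyGetD s (i + 1) "" ++ "   " ++
          PySem.List.pyGetD s (i + 2) "") ∘ (fun j : Nat => ((2 * j : Nat) : Int))) j = F s j := by
    intro j _
    have e1 : ((2 * j : Nat) : Int) + 1 = ((2 * j + 1 : Nat) : Int) := by push_cast; ring
    have e2 : ((2 * j : Nat) : Int) + 2 = ((2 * j + 2 : Nat) : Int) := by push_cast; ring
    simp only [Function.comp_apply, e1, e2, PySem.List.pyGetD_natCast]
    rfl
  rw [List.map_congr_left hfun]
  exact range_map_F ms "S1" a0 alast

lemma altB_eq_chain (ms : List String) (a0 alast : String) :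
    ((("S1" :: ms.map (fun m => "+" ++ m)).zip ((a0 :: ms).zip (ms.map (fun m => "+" ++ m) ++ [alast]))).map
      (fun p => p.1 ++ String.ofList (PySem.List.pyRepeat [' '] (max 1 (6 - PySem.Str.len p.1))) ++
        p.2.1 ++ "   " ++ p.2.2)) = chain "S1" a0 ms alast := by
  -- generalize the two heads of the chain
  suffices h : ∀ (ms : List String) (l m : String),
      (((l :: ms.map (fun x => "+" ++ x)).zip ((m :: ms).zip (ms.map (fun x => "+" ++ x) ++ [alast]))).map
        (fun p => p.1 ++ String.ofList (PySem.List.pyRepeat [' '] (max 1 (6 - PySem.Str.len p.1))) ++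
          p.2.1 ++ "   " ++ p.2.2)) = chain l m ms alast by
    exact h ms "S1" a0
  intro ms
  induction ms with
  | nil =>
    intro l m
    simp only [List.map_nil, List.nil_append, List.zip_cons_cons, List.zip_nil_left,
      List.map_cons, List.map_nil]
    rw [fmtB_eq]
    rfl
  | cons x t ih =>
    intro l m
    simp only [List.map_cons, List.cons_append, List.zip_cons_cons, List.map_cons]
    rw [ih ("+" ++ x) x, fmtB_eq]
    rfl

-- ===== VERDICT (by name: the statement is the Claim_ definition above) =====
theorem split_rules_spec : Claim_equal_split_rules := by
  intro firt_symbol atoms _ _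
  unfold Spec_split_rules
  simp only [split_rules, split_rules_alt, List.singleton_append]
  rw [subrules_eq atoms _ _, loopA_eq_chain, altB_eq_chain]
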